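-- pv_equiv track=rewrite | github.com/SciCrunch/bio-answerfinder | scripts/qk_ranknet.py | _get_lowest_matching_idx
-- ===== SOURCE A (Python) =====
-- def _get_lowest_matching_idx(low_ranks, ranks):
--     min_idx = len(ranks)
--     for lr in low_ranks:
--         try:
--             idx = ranks.index(lr)
--             min_idx = min(idx, min_idx)
--         except:
--             ranks.append(lr)
--     return min_idx
-- ===== SOURCE B (Python) =====
-- def _get_lowest_matching_idx(low_ranks, ranks):
--     # Transposed search: scan ranks once for the first position holding any
--     # low_ranks element (that position IS the minimum first-index A computes),
--     # then replicate A's dedup-append mutation in a separate pass.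
--     min_idx = len(ranks)
--     for i, r in enumerate(ranks):
--         if r in low_ranks:
--             min_idx = i
--             break
--     for lr in low_ranks:
--         if lr not in ranks:
--             ranks.append(lr)
--     return min_idx
-- ===== Notes on version B (the rewrite author's own statement) =====
-- stated objective: alternative
-- what changed: B transposes the search: instead of querying ranks.index for each low_ranks element inside a try/except and taking the running minimum, B scans ranks once from the front and stops at the first element contained in low_ranks (which equals A's minimum first-index), then performs A's dedup-append mutation in a separate second loop.
import Mathlib
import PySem

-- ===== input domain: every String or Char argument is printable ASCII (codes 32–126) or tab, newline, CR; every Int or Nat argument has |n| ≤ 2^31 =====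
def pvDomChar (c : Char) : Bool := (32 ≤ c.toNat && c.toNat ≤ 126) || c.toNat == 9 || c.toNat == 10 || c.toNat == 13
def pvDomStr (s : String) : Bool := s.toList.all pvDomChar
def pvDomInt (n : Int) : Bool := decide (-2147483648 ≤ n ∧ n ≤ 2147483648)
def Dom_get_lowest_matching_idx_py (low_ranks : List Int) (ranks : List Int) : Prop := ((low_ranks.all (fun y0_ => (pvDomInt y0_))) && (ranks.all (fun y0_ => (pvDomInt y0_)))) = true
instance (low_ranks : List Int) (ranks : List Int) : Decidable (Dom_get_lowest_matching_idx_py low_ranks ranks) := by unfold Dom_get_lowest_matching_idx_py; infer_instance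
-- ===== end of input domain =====

-- B replaces A's per-element ranks.index/try-except minimum with a single front-to-back
-- scan of ranks stopping at the first element contained in low_ranks, plus a separate
-- dedup-append pass; equivalence proved about the RETURN value (both Pythons mutate
-- ranks identically; the mutation is not representable in the Lean signature).


-- ===== PORT A =====
-- loop 'for lr in low_ranks' with state (min_idx, ranks); ranks.index → PySem.List.index?
-- (none = ValueError, caught by the bare except, which appends lr).
def goA_get_lowest : List Int → Int → List Int → Int
  | [], m, _ => m
  | lr :: rest, m, rk =>
    match PySem.List.index? rk lr with
    | some i => goA_get_lowest rest (min (i : Int) m) rk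
    | none => goA_get_lowest rest m (rk ++ [lr])

def get_lowest_matching_idx_py (low_ranks : List Int) (ranks : List Int) : Int :=
  goA_get_lowest low_ranks (ranks.length : Int) ranks

-- ===== PORT B =====
-- Source B's first loop: 'for i, r in enumerate(ranks): if r in low_ranks: min_idx = i; break',
-- falling through to min_idx = len(ranks).  Source B's second loop only mutates the ranks
-- argument (same appends as A) and does not affect the returned value, which is all the
-- Lean signature can express.
def goB_get_lowest (low : List Int) : List Int → Nat → Int
  | [], i => (i : Int)
  | r :: rest, i => if r ∈ low then (i : Int) else goB_get_lowest low rest (i + 1)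

def get_lowest_matching_idx_py_alt (low_ranks : List Int) (ranks : List Int) : Int :=
  goB_get_lowest low_ranks ranks 0

-- ===== PRECONDITION & SPEC =====
def Spec_get_lowest_matching_idx_py (low_ranks : List Int) (ranks : List Int) (out : Int) : Prop := out = get_lowest_matching_idx_py_alt low_ranks ranks
instance (low_ranks : List Int) (ranks : List Int) (out : Int) : Decidable (Spec_get_lowest_matching_idx_py low_ranks ranks out) := by unfold Spec_get_lowest_matching_idx_py; infer_instance

-- ===== CLAIM (what is proved, stated in full; the proofs are below) =====
def Claim_equal_get_lowest_matching_idx_py : Prop := ∀ (low_ranks : List Int) (ranks : List Int), Dom_get_lowest_matching_idx_py low_ranks ranks → Spec_get_lowest_matching_idx_py low_ranks ranks (get_lowest_matching_idx_py low_ranks ranks)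

-- ===== LEMMAS AND PROOFS =====

-- The minimum-of-first-indices fold over low, against a FIXED list rk0 (A's state
-- reduced to it: appended elements can never lower the minimum).
def Fmin (rk0 : List Int) : List Int → Int → Int
  | [], m => m
  | lr :: rest, m =>
    match PySem.List.index? rk0 lr with
    | some i => Fmin rk0 rest (min (i : Int) m)
    | none => Fmin rk0 rest m

theorem Fmin_le {rk0 : List Int} (low : List Int) (m : Int) : Fmin rk0 low m ≤ m := by
  induction low generalizing m with
  | nil => simp [Fmin]
  | cons lr rest ih =>
    simp only [Fmin]
    cases h : PySem.List.index? rk0 lr with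
    | none => exact ih m
    | some i => exact le_trans (ih _) (min_le_right _ _)

theorem Fmin_nonneg {rk0 : List Int} (low : List Int) (m : Int) (hm : 0 ≤ m) :
    0 ≤ Fmin rk0 low m := by
  induction low generalizing m with
  | nil => simpa [Fmin]
  | cons lr rest ih =>
    simp only [Fmin]
    cases h : PySem.List.index? rk0 lr with
    | none => exact ih m hm
    | some i => exact ih _ (le_min (Int.natCast_nonneg i) hm)

theorem Fmin_le_index {rk0 : List Int} {lr : Int} {i : Nat} (low : List Int) (m : Int)
    (hmem : lr ∈ low) (hidx : PySem.List.index? rk0 lr = some i) :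
    Fmin rk0 low m ≤ (i : Int) := by
  induction low generalizing m with
  | nil => cases hmem
  | cons x rest ih =>
    simp only [Fmin]
    rcases List.mem_cons.mp hmem with h | h
    · subst h
      rw [hidx]
      exact le_trans (Fmin_le rest _) (min_le_left _ _)
    · cases hx : PySem.List.index? rk0 x with
      | none => exact ih m h
      | some j => exact ih _ h

-- index into an extended list, element not in the prefix: index is ≥ the prefix length
theorem index_append_ge {rk0 extra : List Int} {lr : Int} {i : Nat}
    (hni : lr ∉ rk0) (h : PySem.List.index? (rk0 ++ extra) lr = some i) :
    rk0.length ≤ i := by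
  by_contra hc
  have hlt : i < rk0.length := Nat.lt_of_not_le hc
  obtain ⟨hk, hget, _⟩ := PySem.List.getElem_of_index?_eq_some h
  rw [List.getElem_append_left hlt] at hget
  exact hni (hget ▸ List.getElem_mem _)

-- A's loop over an extended ranks list computes the fold over the original rk0.
theorem goA_eq_Fmin (low : List Int) (rk0 extra : List Int) (m : Int)
    (hm : m ≤ (rk0.length : Int)) :
    goA_get_lowest low m (rk0 ++ extra) = Fmin rk0 low m := by
  induction low generalizing extra m with
  | nil => simp [goA_get_lowest, Fmin]
  | cons lr rest ih =>
    simp only [goA_get_lowest, Fmin]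
    by_cases hmem : lr ∈ rk0
    · rw [PySem.List.index?_append_of_mem extra hmem]
      cases hidx : PySem.List.index? rk0 lr with
      | none => exact absurd hmem ((PySem.List.index?_eq_none_iff rk0 lr).mp hidx)
      | some i =>
        change goA_get_lowest rest (min (i : Int) m) (rk0 ++ extra) =
          Fmin rk0 rest (min (i : Int) m)
        exact ih extra _ (le_trans (min_le_right _ _) hm)
    · have hno : PySem.List.index? rk0 lr = none :=
        (PySem.List.index?_eq_none_iff rk0 lr).mpr hmem
      rw [hno]
      cases hidx : PySem.List.index? (rk0 ++ extra) lr with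
      | some i =>
        have hge := index_append_ge hmem hidx
        change goA_get_lowest rest (min (i : Int) m) (rk0 ++ extra) = Fmin rk0 rest m
        rw [min_eq_right (le_trans hm (by exact_mod_cast hge))]
        exact ih extra m hm
      | none =>
        change goA_get_lowest rest m (rk0 ++ extra ++ [lr]) = Fmin rk0 rest m
        rw [List.append_assoc]
        exact ih (extra ++ [lr]) m hm

-- shifting the fold across a head element not in low
theorem Fmin_shift {r : Int} {low : List Int} (rest : List Int) (m : Int)
    (hr : r ∉ low) : Fmin (r :: rest) low (m + 1) = Fmin rest low m + 1 := by
  induction low generalizing m with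
  | nil => simp [Fmin]
  | cons lr tail ih =>
    have hne : r ≠ lr := fun h => hr (h ▸ List.mem_cons_self ..)
    have hrt : r ∉ tail := fun h => hr (List.mem_cons_of_mem _ h)
    simp only [Fmin]
    cases hidx : PySem.List.index? rest lr with
    | none =>
      have h2 : PySem.List.index? (r :: rest) lr = none := by
        rw [PySem.List.index?_cons_of_ne rest hne, hidx]; rfl
      rw [h2]
      exact ih m hrt
    | some i =>
      have h2 : PySem.List.index? (r :: rest) lr = some (i + 1) := by
        rw [PySem.List.index?_cons_of_ne rest hne, hidx]; rfl
      rw [h2]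
      change Fmin (r :: rest) tail (min ((i + 1 : Nat) : Int) (m + 1)) =
        Fmin rest tail (min (i : Int) m) + 1
      rw [show min ((i + 1 : Nat) : Int) (m + 1) = min (i : Int) m + 1 by push_cast; omega]
      exact ih _ hrt

-- B's counter only offsets the result
theorem goB_shift (low : List Int) (rk : List Int) (i : Nat) :
    goB_get_lowest low rk (i + 1) = goB_get_lowest low rk i + 1 := by
  induction rk generalizing i with
  | nil => simp [goB_get_lowest]
  | cons x xs ihx =>
    by_cases hx : x ∈ low
    · simp [goB_get_lowest, hx]
    · simp only [goB_get_lowest, if_neg hx]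
      exact ihx (i + 1)

-- the fold equals B's scan
theorem Fmin_eq_goB (low : List Int) (rk0 : List Int) :
    Fmin rk0 low (rk0.length : Int) = goB_get_lowest low rk0 0 := by
  induction rk0 with
  | nil =>
    have hall : ∀ m, Fmin ([] : List Int) low m = m := by
      intro m
      induction low generalizing m with
      | nil => simp [Fmin]
      | cons lr rest ih => simp [Fmin, PySem.List.index?, ih]
    simp [hall, goB_get_lowest]
  | cons r rest ih =>
    by_cases hr : r ∈ low
    · -- first index of r in r :: rest is 0, so the fold reaches 0
      have hidx : PySem.List.index? (r :: rest) r = some 0 :=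
        PySem.List.index?_cons_self ..
      have hle := Fmin_le_index (rk0 := r :: rest) low (((r :: rest).length : Nat) : Int) hr hidx
      have hge := Fmin_nonneg (rk0 := r :: rest) low (((r :: rest).length : Nat) : Int)
        (by positivity)
      have h0 : Fmin (r :: rest) low (((r :: rest).length : Nat) : Int) = 0 :=
        le_antisymm (by simpa using hle) hge
      rw [h0]
      simp [goB_get_lowest, hr]
    · have hlen : (((r :: rest).length : Nat) : Int) = (rest.length : Int) + 1 := by
        push_cast [List.length_cons]; ring
      rw [hlen, Fmin_shift rest _ hr, ih]
      simp only [goB_get_lowest, if_neg hr]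
      rw [show (0 : Nat) + 1 = 1 from rfl] at *
      rw [show goB_get_lowest low rest 1 = goB_get_lowest low rest 0 + 1 from goB_shift low rest 0]

-- ===== VERDICT (by name: the statement is the Claim_ definition above) =====
theorem get_lowest_matching_idx_py_spec : Claim_equal_get_lowest_matching_idx_py := by
  intro low ranks _
  unfold Spec_get_lowest_matching_idx_py get_lowest_matching_idx_py get_lowest_matching_idx_py_alt
  have h := goA_eq_Fmin low ranks [] (ranks.length : Int) le_rfl
  rw [List.append_nil] at h
  rw [h, Fmin_eq_goB]
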